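-- pv_equiv track=rewrite | github.com/pypi-data/pypi-mirror-401 | packages/kapipe/kapipe-0.1.2.tar.gz/kapipe-0.1.2/kapipe/docre/atlop.py | get_subtoken_index_to_sentence_index
-- ===== SOURCE A (Python) =====
-- def get_subtoken_index_to_sentence_index(
--
--     segments: list[list[str]],
--     doc_sentence_end: list[bool]
-- ) -> list[int]:
--     assert len(doc_sentence_end) == sum([len(seg) - 2 for seg in segments])
--     sent_map = []
--     sent_idx, subtok_idx = 0, 0
--     for segment in segments:
--         sent_map.append(sent_idx) # [CLS]
--         length = len(segment) - 2
--         for i in range(length):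
--             sent_map.append(sent_idx)
--             sent_idx += int(doc_sentence_end[subtok_idx]) # 0 or 1
--             subtok_idx += 1
--         # [SEP] is the current sentence's last token
--         sent_map.append(sent_idx - 1)
--     return sent_map
-- ===== SOURCE B (Python) =====
-- def get_subtoken_index_to_sentence_index(segments, doc_sentence_end):
--     assert len(doc_sentence_end) == sum([len(seg) - 2 for seg in segments])
--     # prefix-sum table: sent_at[j] = sentence index at global subtoken j
--     sent_at = [0]
--     for x in doc_sentence_end:
--         sent_at.append(sent_at[-1] + int(x))
--     sent_map = []
--     offset = 0
--     for seg in segments: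
--         L = len(seg) - 2
--         sent_map.append(sent_at[offset])                      # [CLS]
--         sent_map.extend(sent_at[offset + i] for i in range(L))
--         sent_map.append(sent_at[offset + L] - 1)              # [SEP]
--         offset += L
--     return sent_map
-- ===== Notes on version B (the rewrite author's own statement) =====
-- stated objective: alternative
-- what changed: B precomputes a prefix-sum table sent_at (sentence index per global subtoken position) once and then lays out each segment by pure table lookups with a running offset, instead of A's single interleaved walk that mutates a running sentence counter per token.
import Mathlib
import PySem

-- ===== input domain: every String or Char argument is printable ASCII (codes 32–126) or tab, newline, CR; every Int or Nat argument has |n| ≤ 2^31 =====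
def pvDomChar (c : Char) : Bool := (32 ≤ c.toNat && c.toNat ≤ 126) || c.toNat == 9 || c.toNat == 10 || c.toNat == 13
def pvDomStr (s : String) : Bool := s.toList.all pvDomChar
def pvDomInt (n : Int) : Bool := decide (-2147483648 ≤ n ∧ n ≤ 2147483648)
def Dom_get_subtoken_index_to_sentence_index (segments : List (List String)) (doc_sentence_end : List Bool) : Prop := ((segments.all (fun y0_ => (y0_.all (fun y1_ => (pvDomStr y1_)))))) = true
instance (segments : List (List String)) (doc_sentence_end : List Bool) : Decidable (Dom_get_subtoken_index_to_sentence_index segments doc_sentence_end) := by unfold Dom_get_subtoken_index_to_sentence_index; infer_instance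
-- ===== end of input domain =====

-- B replaces A's running sentence counter by a prefix-sum table indexed per segment (objective: alternative decomposition).

-- ===== PORT A =====
-- one iteration of A's outer loop: append [CLS], walk the inner tokens, append [SEP]
def pyStepA (doc_sentence_end : List Bool) (st : List Int × Int × Int) (segment : List String) :
    List Int × Int × Int :=
  -- range(len(segment) - 2): empty when len < 2, exactly as Python's range of a negative
  let st2 := (List.range (segment.length - 2)).foldl
    (fun s _ =>
      (s.1 ++ [s.2.1],
       s.2.1 + (if (PySem.List.pyGet? doc_sentence_end s.2.2).getD false then 1 else 0),
       s.2.2 + 1)) (st.1 ++ [st.2.1], st.2.1, st.2.2)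
  (st2.1 ++ [st2.2.1 - 1], st2.2.1, st2.2.2)

def get_subtoken_index_to_sentence_index (segments : List (List String)) (doc_sentence_end : List Bool) : List Int :=
  -- the Python assert (and its IndexError companion) is excluded by Pre_
  (segments.foldl (pyStepA doc_sentence_end) ([], 0, 0)).1

-- ===== PORT B =====
-- Source B's prefix-sum table: sent_at[j] = sentence index at global subtoken j
def pvSentAt (doc_sentence_end : List Bool) : List Int :=
  doc_sentence_end.foldl
    (fun acc x => acc ++ [(PySem.List.pyGet? acc (-1)).getD 0 + (if x then 1 else 0)]) [0]

-- one iteration of Source B's per-segment loop over (sent_map, offset)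
def pyStepB (sent_at : List Int) (st : List Int × Int) (seg : List String) : List Int × Int :=
  let L : Int := (seg.length : Int) - 2
  (st.1 ++ [(PySem.List.pyGet? sent_at st.2).getD 0]
        ++ (List.range L.toNat).map (fun (i : Nat) => (PySem.List.pyGet? sent_at (st.2 + (i : Int))).getD 0)
        ++ [(PySem.List.pyGet? sent_at (st.2 + L)).getD 0 - 1],
   st.2 + L)

def get_subtoken_index_to_sentence_index_alt (segments : List (List String)) (doc_sentence_end : List Bool) : List Int :=
  let sent_at := pvSentAt doc_sentence_end
  (segments.foldl (pyStepB sent_at) ([], 0)).1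

-- ===== PRECONDITION & SPEC =====
-- Pre_ excludes exactly the inputs on which A raises: the assert fails, or some segment has
-- fewer than 2 subtokens, in which case A's subtoken index overruns doc_sentence_end (IndexError).
def Pre_get_subtoken_index_to_sentence_index (segments : List (List String)) (doc_sentence_end : List Bool) : Prop :=
  (doc_sentence_end.length : Int) = (segments.map (fun seg => (seg.length : Int) - 2)).sum ∧
  ∀ seg ∈ segments, 2 ≤ seg.length
instance (segments : List (List String)) (doc_sentence_end : List Bool) : Decidable (Pre_get_subtoken_index_to_sentence_index segments doc_sentence_end) := by unfold Pre_get_subtoken_index_to_sentence_index; infer_instance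

def pvWitness_get_subtoken_index_to_sentence_index : List (List String) × List Bool :=
  ([["[CLS]", "a", "b", "[SEP]"]], [false, true])

def Spec_get_subtoken_index_to_sentence_index (segments : List (List String)) (doc_sentence_end : List Bool) (out : List Int) : Prop := out = get_subtoken_index_to_sentence_index_alt segments doc_sentence_end
instance (segments : List (List String)) (doc_sentence_end : List Bool) (out : List Int) : Decidable (Spec_get_subtoken_index_to_sentence_index segments doc_sentence_end out) := by unfold Spec_get_subtoken_index_to_sentence_index; infer_instance

-- ===== CLAIM (what is proved, stated in full; the proofs are below) =====
def Claim_equal_get_subtoken_index_to_sentence_index : Prop := ∀ (segments : List (List String)) (doc_sentence_end : List Bool), Dom_get_subtoken_index_to_sentence_index segments doc_sentence_end → Pre_get_subtoken_index_to_sentence_index segments doc_sentence_end → Spec_get_subtoken_index_to_sentence_index segments doc_sentence_end (get_subtoken_index_to_sentence_index segments doc_sentence_end)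

-- ===== LEMMAS AND PROOFS =====

-- number of sentence ends among the first k subtokens
def pvPc (dse : List Bool) (k : Nat) : Int := ((dse.take k).count true : Int)

-- the values Source B's table holds after the seed 0
def pvPref (v : Int) : List Bool → List Int
  | [] => []
  | x :: xs => (v + (if x then 1 else 0)) :: pvPref (v + (if x then 1 else 0)) xs

theorem pvPc_zero (dse : List Bool) : pvPc dse 0 = 0 := by simp [pvPc]

theorem pvPc_succ (dse : List Bool) (k : Nat) (h : k < dse.length) :
    pvPc dse (k + 1) = pvPc dse k + (if dse[k] then 1 else 0) := by
  unfold pvPc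
  rw [List.take_succ, List.getElem?_eq_getElem h]
  by_cases hb : dse[k] <;> simp [hb, List.count_append] <;> push_cast <;> ring

theorem pvSentAt_foldl (l : List Bool) : ∀ (acc : List Int) (v : Int), acc.getLast? = some v →
    l.foldl (fun acc x => acc ++ [(PySem.List.pyGet? acc (-1)).getD 0 + (if x then 1 else 0)]) acc
      = acc ++ pvPref v l := by
  induction l with
  | nil => intro acc v _; simp [pvPref]
  | cons x xs ih =>
    intro acc v hv
    have hlast : (PySem.List.pyGet? acc (-1)).getD 0 = v := by
      rw [PySem.List.pyGet?_neg_one, hv]; rfl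
    simp only [List.foldl_cons, hlast]
    rw [ih (acc ++ [v + (if x then 1 else 0)]) (v + (if x then 1 else 0)) (by simp)]
    simp [pvPref]

theorem pvSentAt_eq (dse : List Bool) : pvSentAt dse = 0 :: pvPref 0 dse := by
  have := pvSentAt_foldl dse [0] 0 (by simp)
  simpa [pvSentAt] using this

theorem pvPref_get (l : List Bool) : ∀ (v : Int) (k : Nat), k ≤ l.length →
    (v :: pvPref v l)[k]? = some (v + pvPc l k) := by
  induction l with
  | nil =>
    intro v k hk
    have hk0 : k = 0 := Nat.le_zero.mp (by simpa using hk)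
    subst hk0
    simp [pvPc]
  | cons x xs ih =>
    intro v k hk
    cases k with
    | zero => simp [pvPc]
    | succ k =>
      have hk' : k ≤ xs.length := by simpa using hk
      simp only [pvPref, List.getElem?_cons_succ]
      rw [ih (v + (if x then 1 else 0)) k hk']
      have hc : pvPc (x :: xs) (k + 1) = (if x then 1 else 0) + pvPc xs k := by
        unfold pvPc
        rw [List.take_succ_cons]
        by_cases hx : x <;> simp [hx, List.count_cons] <;> push_cast <;> ring
      rw [hc]
      exact congrArg some (by ring)

-- looking up the table at an in-range position yields the prefix count
theorem pvSentAt_get (dse : List Bool) (k : Nat) (hk : k ≤ dse.length) :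
    (PySem.List.pyGet? (pvSentAt dse) ((k : Nat) : Int)).getD 0 = pvPc dse k := by
  rw [PySem.List.pyGet?_natCast, pvSentAt_eq, pvPref_get dse 0 k hk]
  simp

-- A's inner loop, characterised: starting at global position k with the running counter pvPc k
theorem pyStepA_inner (dse : List Bool) (L : Nat) : ∀ (k : Nat) (m : List Int), k + L ≤ dse.length →
    (List.range L).foldl
      (fun s _ =>
        (s.1 ++ [s.2.1],
         s.2.1 + (if (PySem.List.pyGet? dse s.2.2).getD false then 1 else 0),
         s.2.2 + 1)) (m, pvPc dse k, ((k : Nat) : Int))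
      = (m ++ (List.range L).map (fun i => pvPc dse (k + i)), pvPc dse (k + L), (((k + L) : Nat) : Int)) := by
  induction L with
  | zero => intro k m _; simp
  | succ L ih =>
    intro k m h
    have hlt : k + L < dse.length := by omega
    have hget : (PySem.List.pyGet? dse (((k + L) : Nat) : Int)).getD false = dse[k + L] := by
      rw [PySem.List.pyGet?_natCast]
      simp [List.getElem?_eq_getElem hlt]
    rw [List.range_succ, List.foldl_append, ih k m (by omega)]
    simp only [List.foldl_cons, List.foldl_nil, hget]
    simp only [List.map_append, List.map_cons, List.map_nil, Prod.mk.injEq]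
    refine ⟨by simp, ?_, by push_cast; ring⟩
    rw [show k + (L + 1) = (k + L) + 1 by omega, pvPc_succ dse (k + L) hlt]

-- one segment: A's step from (m, pvPc k, k) equals B's step from (m, k); both advance to k + (n-2)
theorem pvStep_eq (dse : List Bool) (seg : List String) (k : Nat) (m : List Int)
    (hseg : 2 ≤ seg.length) (hk : k + (seg.length - 2) ≤ dse.length) :
    pyStepA dse (m, pvPc dse k, ((k : Nat) : Int)) seg
      = ((pyStepB (pvSentAt dse) (m, ((k : Nat) : Int)) seg).1,
         pvPc dse (k + (seg.length - 2)), (((k + (seg.length - 2)) : Nat) : Int)) ∧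
    (pyStepB (pvSentAt dse) (m, ((k : Nat) : Int)) seg).2 = (((k + (seg.length - 2)) : Nat) : Int) := by
  set L : Nat := seg.length - 2 with hL
  have hLi : ((seg.length : Int) - 2) = (L : Int) := by omega
  have hLtoNat : ((seg.length : Int) - 2).toNat = L := by omega
  have hCLS : (PySem.List.pyGet? (pvSentAt dse) ((k : Nat) : Int)).getD 0 = pvPc dse k :=
    pvSentAt_get dse k (by omega)
  have hSEP : (PySem.List.pyGet? (pvSentAt dse) (((k : Nat) : Int) + ((L : Nat) : Int))).getD 0
      = pvPc dse (k + L) := by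
    rw [show (((k : Nat) : Int) + ((L : Nat) : Int)) = (((k + L) : Nat) : Int) by push_cast; ring]
    exact pvSentAt_get dse (k + L) hk
  have hmap : (List.range L).map
        (fun i => (PySem.List.pyGet? (pvSentAt dse) (((k : Nat) : Int) + ((i : Nat) : Int))).getD 0)
      = (List.range L).map (fun i => pvPc dse (k + i)) := by
    apply List.map_congr_left
    intro i hi
    have hi' : i < L := List.mem_range.mp hi
    rw [show (((k : Nat) : Int) + ((i : Nat) : Int)) = (((k + i) : Nat) : Int) by push_cast; ring]
    exact pvSentAt_get dse (k + i) (by omega)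
  constructor
  · simp only [pyStepA, pyStepB]
    rw [← hL]
    rw [pyStepA_inner dse L k (m ++ [pvPc dse k]) hk]
    rw [hLtoNat, hLi, hCLS, hSEP, hmap]
  · simp only [pyStepB]
    rw [hLi]
    push_cast
    ring

-- the two outer loops run in lock-step
theorem pvMain (dse : List Bool) (segs : List (List String)) :
    ∀ (k : Nat) (m : List Int),
    (∀ s ∈ segs, 2 ≤ s.length) →
    k + ((segs.map (fun s => s.length - 2)).sum) ≤ dse.length →
    (segs.foldl (pyStepA dse) (m, pvPc dse k, ((k : Nat) : Int))).1
      = (segs.foldl (pyStepB (pvSentAt dse)) (m, ((k : Nat) : Int))).1 := by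
  induction segs with
  | nil => intro k m _ _; simp
  | cons s ss ih =>
    intro k m hall hlen
    have hs : 2 ≤ s.length := hall s (List.mem_cons_self ..)
    have hk : k + (s.length - 2) ≤ dse.length := by
      simp only [List.map_cons, List.sum_cons] at hlen; omega
    obtain ⟨hA, hB⟩ := pvStep_eq dse s k m hs hk
    simp only [List.foldl_cons]
    rw [hA]
    have hBst : pyStepB (pvSentAt dse) (m, ((k : Nat) : Int)) s
        = ((pyStepB (pvSentAt dse) (m, ((k : Nat) : Int)) s).1,
           (((k + (s.length - 2)) : Nat) : Int)) := by
      rw [← hB]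
    rw [hBst]
    exact ih (k + (s.length - 2)) _ (fun t ht => hall t (List.mem_cons_of_mem _ ht))
      (by simp only [List.map_cons, List.sum_cons] at hlen; omega)

-- the Nat-subtraction sum agrees with Python's Int sum when every segment has length ≥ 2
theorem pvSumCast (segs : List (List String)) :
    (∀ s ∈ segs, 2 ≤ s.length) →
    (((segs.map (fun s => s.length - 2)).sum : Nat) : Int)
      = (segs.map (fun seg => (seg.length : Int) - 2)).sum := by
  induction segs with
  | nil => intro _; simp
  | cons s ss ih =>
    intro hall
    have hs : 2 ≤ s.length := hall s (List.mem_cons_self ..)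
    simp only [List.map_cons, List.sum_cons, Nat.cast_add]
    rw [ih (fun t ht => hall t (List.mem_cons_of_mem _ ht))]
    omega

-- ===== VERDICT (by name: the statement is the Claim_ definition above) =====
theorem get_subtoken_index_to_sentence_index_spec : Claim_equal_get_subtoken_index_to_sentence_index := by
  intro segments dse _ hpre
  obtain ⟨hsum, hall⟩ := hpre
  unfold Spec_get_subtoken_index_to_sentence_index
  have hlen : 0 + ((segments.map (fun s => s.length - 2)).sum) ≤ dse.length := by
    have := pvSumCast segments hall
    omega
  have h2 := pvMain dse segments 0 [] hall hlen
  simp only [pvPc_zero, Nat.cast_zero] at h2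
  show (segments.foldl (pyStepA dse) ([], 0, 0)).1
      = (segments.foldl (pyStepB (pvSentAt dse)) ([], 0)).1
  exact h2
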